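-- pv_equiv track=rewrite | github.com/urmikanrar2003-uk/Mathscrub_project | tokenization.py | step5_union_find_grouping
-- ===== SOURCE A (Python) =====
-- class UnionFind:
--     def __init__(self, n):
--         self.parent = list(range(n))
--         self.rank   = [0] * n
--
--     def find(self, x):
--         # Path compression
--         while self.parent[x] != x:
--             self.parent[x] = self.parent[self.parent[x]]
--             x = self.parent[x]
--         return x
--
--     def union(self, x, y):
--         rx, ry = self.find(x), self.find(y)
--         if rx == ry:
--             return
--         # Union by rank
--         if self.rank[rx] < self.rank[ry]:
--             rx, ry = ry, rx
--         self.parent[ry] = rx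
--         if self.rank[rx] == self.rank[ry]:
--             self.rank[rx] += 1
--
-- def step5_union_find_grouping(components, retained_edges):
--     """
--     Input : components — active component list (after nested suppression)
--             retained_edges — (i, j) pairs that passed edge filtering
--     Output: tokens — list of lists, each inner list = component ids
--                      forming one semantically coherent token
--
--     Transitive merging: if A-B retained and B-C retained,
--     then A, B, C all belong to the same token.
--     """
--     uf = UnionFind(len(components))
--
--     for i, j in retained_edges:
--         uf.union(i, j)
--
--     # Collect groups by root
--     groups = {}
--     for idx in range(len(components)):
--         root = uf.find(idx)
--         groups.setdefault(root, []).append(components[idx]["id"])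
--
--     tokens = list(groups.values())
--     return tokens
-- ===== SOURCE B (Python) =====
-- def step5_union_find_grouping(components, retained_edges):
--     """Weighted quick-find: keep a flat label array plus the member list of each
--     class; merge the smaller class into the larger by relabelling its members."""
--     n = len(components)
--     label = list(range(n))
--     members = {k: [k] for k in range(n)}
--
--     for i, j in retained_edges:
--         a, b = label[i], label[j]
--         if a == b:
--             continue
--         if len(members[a]) < len(members[b]):
--             a, b = b, a
--         for k in members[b]:
--             label[k] = a
--         members[a].extend(members.pop(b))
--
--     groups = {}
--     for idx in range(n):
--         groups.setdefault(label[idx], []).append(components[idx]["id"])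
--     return list(groups.values())
-- ===== Notes on version B (the rewrite author's own statement) =====
-- stated objective: alternative
-- what changed: Replaced A's path-compressed, rank-balanced union-find forest (parent/rank arrays with a mutating find loop) by a flat label array plus per-class member lists, merging the smaller class into the larger by relabelling its members (weighted quick-find), so the final grouping pass reads labels directly instead of chasing roots.
import Mathlib
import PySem

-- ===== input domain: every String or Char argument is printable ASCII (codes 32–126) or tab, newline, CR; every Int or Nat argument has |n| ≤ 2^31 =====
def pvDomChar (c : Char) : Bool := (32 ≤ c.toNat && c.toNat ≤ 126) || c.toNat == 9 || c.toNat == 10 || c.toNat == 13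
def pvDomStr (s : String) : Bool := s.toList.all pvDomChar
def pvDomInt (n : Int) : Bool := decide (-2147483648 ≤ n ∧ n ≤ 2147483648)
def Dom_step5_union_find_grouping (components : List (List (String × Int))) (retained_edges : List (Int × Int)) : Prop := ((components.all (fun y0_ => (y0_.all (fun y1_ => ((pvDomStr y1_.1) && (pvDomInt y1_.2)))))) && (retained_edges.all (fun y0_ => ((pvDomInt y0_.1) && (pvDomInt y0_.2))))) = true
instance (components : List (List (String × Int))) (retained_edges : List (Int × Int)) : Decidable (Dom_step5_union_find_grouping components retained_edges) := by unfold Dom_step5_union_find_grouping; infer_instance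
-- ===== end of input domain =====

-- B replaces the path-compressed, rank-balanced union-find forest of A by a flat
-- label array with per-class member lists merged smaller-into-larger (weighted
-- quick-find); same return value on every input Pre_ admits.

-- ===== PORT A =====
-- UnionFind.find: `while parent[x] != x: parent[x] = parent[parent[x]]; x = parent[x]`.
-- The fuel argument only makes the loop total; the main function passes enough fuel
-- (n + len(edges) + 1) for every input Pre_ admits, so the loop is exact there.
-- Indexing uses pyGetD/pySetD (exact Python semantics for in-range, possibly
-- negative, indices; Pre_ excludes the out-of-range indices where Python raises).
def pvFind : Nat → List Int → Int → List Int × Int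
  | 0, p, x => (p, x)
  | fuel+1, p, x =>
    let px := PySem.List.pyGetD p x 0
    if px = x then (p, x)
    else
      let g := PySem.List.pyGetD p px 0
      pvFind fuel (PySem.List.pySetD p x g) g

-- UnionFind.union
def pvUnion (fuel : Nat) (st : List Int × List Int) (i j : Int) : List Int × List Int :=
  let f1 := pvFind fuel st.1 i
  let f2 := pvFind fuel f1.1 j
  let p := f2.1
  let rk := st.2
  let rx0 := f1.2
  let ry0 := f2.2
  if rx0 = ry0 then (p, rk)
  else
    let swap := PySem.List.pyGetD rk rx0 0 < PySem.List.pyGetD rk ry0 0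
    let rx := if swap then ry0 else rx0
    let ry := if swap then rx0 else ry0
    let p' := PySem.List.pySetD p ry rx
    let rk' := if PySem.List.pyGetD rk rx 0 = PySem.List.pyGetD rk ry 0
               then PySem.List.pySetD rk rx (PySem.List.pyGetD rk rx 0 + 1)
               else rk
    (p', rk')

-- components[idx]["id"]  (Pre_ guarantees the key is present and idx in range)
def pvGetId (components : List (List (String × Int))) (idx : Int) : Int :=
  PySem.Dict.getD (PySem.Dict.mk (PySem.List.pyGetD components idx [])) "id" 0

def step5_union_find_grouping (components : List (List (String × Int))) (retained_edges : List (Int × Int)) : List (List Int) :=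
  let n := components.length
  let fuel := n + retained_edges.length + 1
  let init : List Int × List Int := ((List.range n).map (fun (k : Nat) => (k : Int)), List.replicate n 0)
  let st := retained_edges.foldl (fun s e => pvUnion fuel s e.1 e.2) init
  let fin := (PySem.List.pyRange 0 (n : Int) 1).foldl
    (fun (s : List Int × PySem.Dict Int (List Int)) idx =>
      let fr := pvFind fuel s.1 idx
      (fr.1, PySem.Dict.modify s.2 fr.2 [] (fun L => L ++ [pvGetId components idx])))
    (st.1, PySem.Dict.empty)
  PySem.Dict.values fin.2

-- ===== PORT B =====
-- one merge step of Source B's loop body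
def pvMerge (st : List Int × PySem.Dict Int (List Int)) (i j : Int) : List Int × PySem.Dict Int (List Int) :=
  let label := st.1
  let members := st.2
  let a0 := PySem.List.pyGetD label i 0
  let b0 := PySem.List.pyGetD label j 0
  if a0 = b0 then st
  else
    let swap := (PySem.Dict.getD members a0 []).length < (PySem.Dict.getD members b0 []).length
    let a := if swap then b0 else a0
    let b := if swap then a0 else b0
    let moved := PySem.Dict.getD members b []
    let label' := moved.foldl (fun l k => PySem.List.pySetD l k a) label
    let members' := PySem.Dict.erase (PySem.Dict.modify members a [] (fun L => L ++ moved)) b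
    (label', members')

def step5_union_find_grouping_alt (components : List (List (String × Int))) (retained_edges : List (Int × Int)) : List (List Int) :=
  let n := components.length
  let init : List Int × PySem.Dict Int (List Int) :=
    ((List.range n).map (fun (k : Nat) => (k : Int)),
     (List.range n).foldl (fun d (k : Nat) => PySem.Dict.insert d (k : Int) [(k : Int)]) PySem.Dict.empty)
  let st := retained_edges.foldl (fun s e => pvMerge s e.1 e.2) init
  let groups := (PySem.List.pyRange 0 (n : Int) 1).foldl
    (fun d idx => PySem.Dict.modify d (PySem.List.pyGetD st.1 idx 0) [] (fun L => L ++ [pvGetId components idx]))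
    PySem.Dict.empty
  PySem.Dict.values groups

-- ===== PRECONDITION & SPEC =====
-- Pre_ excludes exactly the inputs where the Python A raises: an edge endpoint
-- outside [-len(components), len(components)) (IndexError in parent[x]) or a
-- component without the key "id" (KeyError).
def Pre_step5_union_find_grouping (components : List (List (String × Int))) (retained_edges : List (Int × Int)) : Prop :=
  (∀ e ∈ retained_edges,
      -(components.length : Int) ≤ e.1 ∧ e.1 < (components.length : Int) ∧
      -(components.length : Int) ≤ e.2 ∧ e.2 < (components.length : Int)) ∧
  (∀ c ∈ components, ((PySem.Dict.get? (PySem.Dict.mk c) "id").isSome = true))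
instance (components : List (List (String × Int))) (retained_edges : List (Int × Int)) : Decidable (Pre_step5_union_find_grouping components retained_edges) := by unfold Pre_step5_union_find_grouping; infer_instance

def pvWitness_step5_union_find_grouping : (List (List (String × Int))) × (List (Int × Int)) :=
  ([[("id", 7)], [("id", 8)], [("id", 9)]], [(0, 2), (-1, 2)])

def Spec_step5_union_find_grouping (components : List (List (String × Int))) (retained_edges : List (Int × Int)) (out : List (List Int)) : Prop := out = step5_union_find_grouping_alt components retained_edges
instance (components : List (List (String × Int))) (retained_edges : List (Int × Int)) (out : List (List Int)) : Decidable (Spec_step5_union_find_grouping components retained_edges out) := by unfold Spec_step5_union_find_grouping; infer_instance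

-- ===== CLAIM (what is proved, stated in full; the proofs are below) =====
def Claim_equal_step5_union_find_grouping : Prop := ∀ (components : List (List (String × Int))) (retained_edges : List (Int × Int)), Dom_step5_union_find_grouping components retained_edges → Pre_step5_union_find_grouping components retained_edges → Spec_step5_union_find_grouping components retained_edges (step5_union_find_grouping components retained_edges)

-- ===== LEMMAS AND PROOFS =====

-- entry of an Int list at a Nat position (all positions used are < length)
def ent (p : List Int) (m : Nat) : Int := p.getD m 0
-- the Nat position Python's (possibly negative) in-range index i denotes
def normN (n : Nat) (x : Int) : Nat := if x < 0 then (x + n).toNat else x.toNat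
-- pure (non-mutating) chase to the root, with fuel
def chase : Nat → List Int → Nat → Nat
  | 0, _, m => m
  | f+1, p, m => if (ent p m).toNat = m then m else chase f p (ent p m).toNat
def IsRt (p : List Int) (m : Nat) : Prop := (ent p m).toNat = m
-- invariants of the union-find state
def POK (n : Nat) (p : List Int) : Prop :=
  p.length = n ∧ ∀ m : Nat, m < n → 0 ≤ ent p m ∧ ent p m < (n : Int)
def RK (n k : Nat) (p rk : List Int) : Prop :=
  rk.length = n ∧ (∀ m : Nat, m < n → 0 ≤ ent rk m ∧ ent rk m ≤ (k : Int)) ∧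
  (∀ m : Nat, m < n → ¬ IsRt p m → ent rk m < ent rk (ent p m).toNat)
-- invariants of B's state
def LOK (n : Nat) (l : List Int) : Prop :=
  l.length = n ∧ ∀ m : Nat, m < n → 0 ≤ ent l m ∧ ent l m < (n : Int)
def MOK (n : Nat) (l : List Int) (d : PySem.Dict Int (List Int)) : Prop :=
  ∀ c : Int,
    (d.get? c = none → ∀ m : Nat, m < n → ent l m ≠ c) ∧
    (∀ L, d.get? c = some L → ∀ x : Int, x ∈ L ↔ ∃ m : Nat, m < n ∧ ent l m = c ∧ x = (m : Int))

theorem ent_set (p : List Int) (q : Nat) (v : Int) (m : Nat) :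
    ent (p.set q v) m = if q = m ∧ q < p.length then v else ent p m := by
  unfold ent List.getD
  by_cases hq : q = m
  · subst hq
    by_cases hlt : q < p.length
    · simp [List.getElem?_set_self, hlt]
    · rw [List.set_eq_of_length_le (by omega)]
      simp [hlt]
  · simp [List.getElem?_set_ne hq, hq]

theorem normN_lt (n : Nat) (x : Int) (h1 : -(n : Int) ≤ x) (h2 : x < n) : normN n x < n := by
  unfold normN; split <;> omega

theorem pyGetD_ent (n : Nat) (p : List Int) (hl : p.length = n) (x : Int)
    (h1 : -(n : Int) ≤ x) (h2 : x < n) : PySem.List.pyGetD p x 0 = ent p (normN n x) := by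
  unfold PySem.List.pyGetD PySem.List.pyGet? PySem.List.pyIdx? normN ent
  by_cases hx : 0 ≤ x
  · have : ¬ x < 0 := by omega
    simp only [hx, if_true, hl, h2, if_true, this, if_false]
    simp [List.getD]
  · have hx0 : x < 0 := by omega
    simp only [if_neg hx, hl, h1, if_true, hx0, if_true]
    have he : n - (-x).toNat = (x + n).toNat := by omega
    simp [he, List.getD]

theorem pySetD_ent (n : Nat) (p : List Int) (hl : p.length = n) (x v : Int)
    (h1 : -(n : Int) ≤ x) (h2 : x < n) : PySem.List.pySetD p x v = p.set (normN n x) v := by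
  unfold PySem.List.pySetD PySem.List.pySet? PySem.List.pyIdx? normN
  by_cases hx : 0 ≤ x
  · have : ¬ x < 0 := by omega
    simp only [hx, if_true, hl, h2, if_true, this, if_false, Option.map_some, Option.getD_some]
  · have hx0 : x < 0 := by omega
    simp only [if_neg hx, hl, h1, if_true, hx0, if_true, Option.map_some, Option.getD_some]
    have he : n - (-x).toNat = (x + n).toNat := by omega
    rw [he]


theorem chase_of_isRt (p : List Int) (m : Nat) (h : IsRt p m) : ∀ f, chase f p m = m := by
  unfold IsRt at h
  intro f; cases f with
  | zero => rfl
  | succ f => simp [chase, h]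

theorem chase_ge (n k : Nat) (p rk : List Int) (hp : POK n p) (hrk : RK n k p rk) :
    ∀ (d m : Nat), m < n → (k : Int) ≤ d + ent rk m →
      (∀ f, d ≤ f → chase f p m = chase d p m) ∧ IsRt p (chase d p m) ∧ chase d p m < n := by
  intro d
  induction d with
  | zero =>
    intro m hm hk
    have hroot : IsRt p m := by
      by_contra hr
      have h1 := hrk.2.2 m hm hr
      have hlt : (ent p m).toNat < n := by have := hp.2 m hm; omega
      have h2 := (hrk.2.1 _ hlt).2
      have := (hrk.2.1 m hm).2
      omega
    refine ⟨fun f _ => ?_, ?_, hm⟩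
    · rw [chase_of_isRt p m hroot f]; simp [chase]
    · simpa [chase] using hroot
  | succ d ih =>
    intro m hm hk
    by_cases hroot : IsRt p m
    · refine ⟨fun f _ => ?_, ?_, ?_⟩
      · rw [chase_of_isRt p m hroot f, chase_of_isRt p m hroot (d+1)]
      · rw [chase_of_isRt p m hroot (d+1)]; exact hroot
      · rw [chase_of_isRt p m hroot (d+1)]; exact hm
    · have hm1 : (ent p m).toNat < n := by have := hp.2 m hm; omega
      have hrlt := hrk.2.2 m hm hroot
      have hk1 : (k : Int) ≤ d + ent rk (ent p m).toNat := by omega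
      obtain ⟨hstab, hrt, hlt⟩ := ih (ent p m).toNat hm1 hk1
      have hstep : ∀ g, chase (g+1) p m = chase g p (ent p m).toNat := by
        intro g; simp [chase, hroot, IsRt] at *
        intro hcon; exact absurd hcon hroot
      refine ⟨fun f hf => ?_, ?_, ?_⟩
      · obtain ⟨f', rfl⟩ : ∃ f', f = f' + 1 := ⟨f - 1, by omega⟩
        rw [hstep f', hstep d, hstab f' (by omega)]
      · rw [hstep d]; exact hrt
      · rw [hstep d]; exact hlt

theorem chase_stable (n k : Nat) (p rk : List Int) (hp : POK n p) (hrk : RK n k p rk)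
    (m : Nat) (hm : m < n) : (∀ f, k ≤ f → chase f p m = chase k p m) ∧ IsRt p (chase k p m) ∧ chase k p m < n := by
  have h0 := (hrk.2.1 m hm).1
  exact chase_ge n k p rk hp hrk k m hm (by omega)

theorem chase_step (n k : Nat) (p rk : List Int) (hp : POK n p) (hrk : RK n k p rk)
    (q : Nat) (hq : q < n) (h : ¬ IsRt p q) : chase k p q = chase k p (ent p q).toNat := by
  have := (chase_stable n k p rk hp hrk q hq).1 (k+1) (by omega)
  unfold IsRt at h
  rw [← this]
  simp [chase, h]

theorem set_self_ent (p : List Int) (m : Nat) : p.set m (ent p m) = p := by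
  apply List.ext_getElem?
  intro i
  by_cases h : i = m
  · subst h
    by_cases hl : i < p.length
    · simp [List.getElem?_set_self, hl, ent, List.getD, List.getElem?_eq_getElem hl]
    · have h1 : p.length ≤ i := by omega
      rw [List.getElem?_eq_none (by simpa using h1), List.getElem?_eq_none h1]
  · rw [List.getElem?_set_ne (fun hh => h hh.symm)]

theorem chase_set_anc (n k : Nat) (p rk : List Int) (hp : POK n p) (hrk : RK n k p rk)
    (m : Nat) (hm : m < n) (hroot : ¬ IsRt p m) :
    POK n (p.set m (ent p (ent p m).toNat)) ∧ RK n k (p.set m (ent p (ent p m).toNat)) rk ∧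
      ∀ q, q < n → chase k (p.set m (ent p (ent p m).toNat)) q = chase k p q := by
  set m1 := (ent p m).toNat with hm1def
  have hm1 : m1 < n := by have := hp.2 m hm; omega
  set g := ent p m1 with hgdef
  set m2 := g.toNat with hm2def
  have hm2 : m2 < n := by have := hp.2 m1 hm1; omega
  have hrk12 : ent rk m1 ≤ ent rk m2 := by
    by_cases h1 : IsRt p m1
    · unfold IsRt at h1; rw [hm2def, hgdef, h1]
    · exact le_of_lt (hrk.2.2 m1 hm1 h1)
  have hrkm : ent rk m < ent rk m2 := lt_of_lt_of_le (hrk.2.2 m hm hroot) hrk12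
  have hm2m : m2 ≠ m := by
    intro h; rw [h] at hrkm; omega
  have hlen : p.length = n := hp.1
  have hent : ∀ q, ent (p.set m g) q = if q = m then g else ent p q := by
    intro q
    rw [ent_set]
    by_cases h : q = m
    · rw [if_pos ⟨h.symm, by omega⟩, if_pos h]
    · rw [if_neg (by tauto), if_neg h]
  have hpok : POK n (p.set m g) := by
    refine ⟨by simp [hlen], fun q hq => ?_⟩
    rw [hent]
    split
    · exact hp.2 m1 hm1
    · exact hp.2 q hq
  have hrtiff : ∀ q, q ≠ m → (IsRt (p.set m g) q ↔ IsRt p q) := by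
    intro q hqm; unfold IsRt; rw [hent, if_neg hqm]
  have hrknew : RK n k (p.set m g) rk := by
    refine ⟨hrk.1, hrk.2.1, fun q hq hnr => ?_⟩
    by_cases hqm : q = m
    · subst hqm; rw [hent, if_pos rfl]; exact hrkm
    · rw [hent, if_neg hqm]
      exact hrk.2.2 q hq (by rwa [hrtiff q hqm] at hnr)
  refine ⟨hpok, hrknew, ?_⟩
  have main : ∀ (d q : Nat), q < n → (k : Int) ≤ d + ent rk q → chase k (p.set m g) q = chase k p q := by
    intro d
    induction d with
    | zero =>
      intro q hq hk
      have hroot' : IsRt p q := by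
        by_contra hr
        have h1 := hrk.2.2 q hq hr
        have hq1 : (ent p q).toNat < n := by have := hp.2 q hq; omega
        have h2 := (hrk.2.1 _ hq1).2
        have := (hrk.2.1 q hq).2
        omega
      have hqm : q ≠ m := fun h => hroot (h ▸ hroot')
      rw [chase_of_isRt p q hroot' k, chase_of_isRt _ q ((hrtiff q hqm).2 hroot') k]
    | succ d ih =>
      intro q hq hk
      by_cases hroot' : IsRt p q
      · have hqm : q ≠ m := fun h => hroot (h ▸ hroot')
        rw [chase_of_isRt p q hroot' k, chase_of_isRt _ q ((hrtiff q hqm).2 hroot') k]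
      · by_cases hqm : q = m
        · rw [hqm] at hroot' hq hk ⊢
          have hstep1 : chase k p m = chase k p m1 := chase_step n k p rk hp hrk m hq hroot'
          have hstep2 : chase k p m1 = chase k p m2 := by
            by_cases h1 : IsRt p m1
            · unfold IsRt at h1; rw [hm2def, hgdef, h1]
            · exact chase_step n k p rk hp hrk m1 hm1 h1
          have hnr : ¬ IsRt (p.set m g) m := by
            unfold IsRt; rw [hent, if_pos rfl, ← hm2def]; exact fun h => hm2m h
          have hstep3 : chase k (p.set m g) m = chase k (p.set m g) m2 := by
            have := chase_step n k (p.set m g) rk hpok hrknew m hq hnr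
            rwa [hent, if_pos rfl, ← hm2def] at this
          have hbound : (k : Int) ≤ d + ent rk m2 := by
            have h1 := hrk.2.2 m hq hroot'
            omega
          rw [hstep1, hstep2, hstep3, ih m2 hm2 hbound]
        · have hq1 : (ent p q).toNat < n := by have := hp.2 q hq; omega
          have hstepP : chase k p q = chase k p (ent p q).toNat := chase_step n k p rk hp hrk q hq hroot'
          have hnr : ¬ IsRt (p.set m g) q := by rw [hrtiff q hqm]; exact hroot'
          have hstepP1 : chase k (p.set m g) q = chase k (p.set m g) (ent p q).toNat := by
            have := chase_step n k (p.set m g) rk hpok hrknew q hq hnr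
            rwa [hent, if_neg hqm] at this
          have hbound : (k : Int) ≤ d + ent rk (ent p q).toNat := by
            have h1 := hrk.2.2 q hq hroot'
            omega
          rw [hstepP, hstepP1, ih _ hq1 hbound]
  intro q hq
  exact main k q hq (by have := (hrk.2.1 q hq).1; omega)

theorem pvFind_succ (f : Nat) (p : List Int) (x : Int) :
    pvFind (f+1) p x = if PySem.List.pyGetD p x 0 = x then (p, x)
      else pvFind f (PySem.List.pySetD p x (PySem.List.pyGetD p (PySem.List.pyGetD p x 0) 0)) (PySem.List.pyGetD p (PySem.List.pyGetD p x 0) 0) := rfl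

theorem normN_cast (n : Nat) (m : Nat) : normN n (m : Int) = m := by
  unfold normN; simp

theorem pvFind_root (n : Nat) (p : List Int) (hp : POK n p) (m : Nat) (hm : m < n)
    (hroot : IsRt p m) : ∀ f, pvFind f p (m : Int) = (p, (m : Int)) := by
  intro f
  cases f with
  | zero => rfl
  | succ f =>
    have hget : PySem.List.pyGetD p (m : Int) 0 = ent p m := by
      rw [pyGetD_ent n p hp.1 _ (by omega) (by exact_mod_cast hm), normN_cast]
    have hentm : ent p m = (m : Int) := by
      have h0 := (hp.2 m hm).1
      unfold IsRt at hroot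
      omega
    rw [pvFind_succ, if_pos (by rw [hget, hentm])]

theorem find_spec (n k : Nat) (rk : List Int) :
    ∀ (f : Nat) (p : List Int) (x : Int), POK n p → RK n k p rk →
    -(n : Int) ≤ x → x < n → (k : Int) + 1 < f + ent rk (normN n x) →
    (pvFind f p x).2 = ((chase k p (normN n x) : Nat) : Int)
    ∧ POK n (pvFind f p x).1
    ∧ RK n k (pvFind f p x).1 rk
    ∧ (∀ m : Nat, m < n → chase k (pvFind f p x).1 m = chase k p m) := by
  intro f
  induction f with
  | zero =>
    intro p x hp hrk h1 h2 hf
    have hm := normN_lt n x h1 h2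
    have := (hrk.2.1 _ hm).2
    simp only [Nat.cast_zero, zero_add] at hf
    omega
  | succ f ih =>
    intro p x hp hrk h1 h2 hf
    set m := normN n x with hmdef
    have hm : m < n := normN_lt n x h1 h2
    have hget : PySem.List.pyGetD p x 0 = ent p m := pyGetD_ent n p hp.1 x h1 h2
    by_cases hpx : PySem.List.pyGetD p x 0 = x
    · -- parent[x] == x : x is its own root
      have hx0 : 0 ≤ x := by have := (hp.2 m hm).1; rw [hget] at hpx; omega
      have hxm : x = (m : Int) := by rw [hmdef]; unfold normN; split <;> omega
      have hroot : IsRt p m := by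
        unfold IsRt; rw [← hget, hpx, hxm]; simp
      have hres : pvFind (f+1) p x = (p, x) := by rw [pvFind_succ, if_pos hpx]
      rw [hres]
      refine ⟨?_, hp, hrk, fun q hq => rfl⟩
      rw [chase_of_isRt p m hroot k, hxm]
    · by_cases hroot : IsRt p m
      · -- x is negative but denotes the root m
        have hentm : ent p m = (m : Int) := by
          have h0 := (hp.2 m hm).1
          unfold IsRt at hroot
          omega
        have hg : PySem.List.pyGetD p (PySem.List.pyGetD p x 0) 0 = ent p m := by
          rw [hget, hentm, pyGetD_ent n p hp.1 _ (by omega) (by exact_mod_cast hm), normN_cast]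
          exact hentm
        have hset : PySem.List.pySetD p x (ent p m) = p := by
          rw [pySetD_ent n p hp.1 x _ h1 h2, ← hmdef, set_self_ent]
        have hres : pvFind (f+1) p x = (p, (m : Int)) := by
          rw [pvFind_succ, if_neg hpx, hg, hset, hentm]
          exact pvFind_root n p hp m hm hroot f
        rw [hres]
        refine ⟨?_, hp, hrk, fun q hq => rfl⟩
        rw [chase_of_isRt p m hroot k]
      · -- the generic compression step
        set m1 := (ent p m).toNat with hm1def
        have hm1 : m1 < n := by have := hp.2 m hm; omega
        set g := ent p m1 with hgdef
        set m2 := g.toNat with hm2def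
        have hm2 : m2 < n := by have := hp.2 m1 hm1; omega
        have hg0 : 0 ≤ g := (hp.2 m1 hm1).1
        have hrk12 : ent rk m1 ≤ ent rk m2 := by
          by_cases hr1 : IsRt p m1
          · unfold IsRt at hr1; rw [hm2def, hgdef, hr1]
          · exact le_of_lt (hrk.2.2 m1 hm1 hr1)
        have hrkm : ent rk m < ent rk m2 := lt_of_lt_of_le (hrk.2.2 m hm hroot) hrk12
        have hgget : PySem.List.pyGetD p (PySem.List.pyGetD p x 0) 0 = g := by
          rw [hget, pyGetD_ent n p hp.1 _ (by have := hp.2 m hm; omega) (by have := hp.2 m hm; omega), hgdef]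
          congr 1
          unfold normN
          have := (hp.2 m hm).1
          split <;> omega
        have hset : PySem.List.pySetD p x g = p.set m g := by
          rw [pySetD_ent n p hp.1 x g h1 h2, ← hmdef]
        have hres : pvFind (f+1) p x = pvFind f (p.set m g) g := by
          rw [pvFind_succ, if_neg hpx, hgget, hset]
        obtain ⟨hpok1, hrk1, hpres1⟩ := chase_set_anc n k p rk hp hrk m hm hroot
        have hn2 : normN n g = m2 := by unfold normN; split <;> omega
        have hfuel : (k : Int) + 1 < f + ent rk (normN n g) := by
          rw [hn2]; omega
        obtain ⟨ih1, ih2, ih3, ih4⟩ := ih (p.set m g) g hpok1 hrk1 (by omega) (by rw [hgdef]; exact (hp.2 m1 hm1).2) hfuel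
        rw [hres]
        refine ⟨?_, ih2, ih3, fun q hq => (ih4 q hq).trans (hpres1 q hq)⟩
        rw [ih1, hn2]
        have hchase : chase k p m = chase k p m2 := by
          have hs1 : chase k p m = chase k p m1 := chase_step n k p rk hp hrk m hm hroot
          by_cases hr1 : IsRt p m1
          · unfold IsRt at hr1; rw [hs1, hm2def, hgdef, hr1]
          · rw [hs1, chase_step n k p rk hp hrk m1 hm1 hr1, ← hgdef, ← hm2def]
        rw [hpres1 m2 hm2, ← hchase]

theorem RK_mono (n k : Nat) (p rk : List Int) (h : RK n k p rk) : RK n (k+1) p rk := by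
  refine ⟨h.1, fun m hm => ⟨(h.2.1 m hm).1, ?_⟩, h.2.2⟩
  have := (h.2.1 m hm).2
  push_cast
  omega

theorem chase_set_root (n k : Nat) (p rk rk' : List Int) (hp : POK n p) (hrk : RK n k p rk)
    (rx ry : Nat) (hrx : rx < n) (hry : ry < n) (hrootx : IsRt p rx) (hrooty : IsRt p ry)
    (hne : rx ≠ ry) (hrk' : RK n (k+1) (p.set ry (rx : Int)) rk') :
    ∀ q, q < n → chase (k+1) (p.set ry (rx : Int)) q = (if chase k p q = ry then rx else chase k p q) := by
  have hlen : p.length = n := hp.1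
  have hent : ∀ q, ent (p.set ry (rx : Int)) q = if q = ry then (rx : Int) else ent p q := by
    intro q
    rw [ent_set]
    by_cases h : q = ry
    · rw [if_pos ⟨h.symm, by omega⟩, if_pos h]
    · rw [if_neg (by tauto), if_neg h]
  have hpok : POK n (p.set ry (rx : Int)) := by
    refine ⟨by simp [hlen], fun q hq => ?_⟩
    rw [hent]
    split
    · constructor <;> [positivity; exact_mod_cast hrx]
    · exact hp.2 q hq
  have hrtiff : ∀ q, q ≠ ry → (IsRt (p.set ry (rx : Int)) q ↔ IsRt p q) := by
    intro q hq; unfold IsRt; rw [hent, if_neg hq]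
  have hrootcase : ∀ q, q < n → IsRt p q →
      chase (k+1) (p.set ry (rx : Int)) q = (if chase k p q = ry then rx else chase k p q) := by
    intro q hq hroot'
    by_cases hqry : q = ry
    · rw [hqry] at hroot' hq ⊢
      rw [chase_of_isRt p ry hroot' k, if_pos rfl]
      have hnr : ¬ IsRt (p.set ry (rx : Int)) ry := by
        unfold IsRt; rw [hent, if_pos rfl, Int.toNat_natCast]; exact fun h => hne (h.symm ▸ rfl)
      rw [chase_step n (k+1) _ rk' hpok hrk' ry hq hnr, hent, if_pos rfl, Int.toNat_natCast]
      exact chase_of_isRt _ rx ((hrtiff rx hne).2 hrootx) (k+1)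
    · rw [chase_of_isRt p q hroot' k, if_neg hqry]
      exact chase_of_isRt _ q ((hrtiff q hqry).2 hroot') (k+1)
  have main : ∀ (d q : Nat), q < n → (k : Int) ≤ d + ent rk q →
      chase (k+1) (p.set ry (rx : Int)) q = (if chase k p q = ry then rx else chase k p q) := by
    intro d
    induction d with
    | zero =>
      intro q hq hk
      have hroot' : IsRt p q := by
        by_contra hr
        have h1 := hrk.2.2 q hq hr
        have hq1 : (ent p q).toNat < n := by have := hp.2 q hq; omega
        have h2 := (hrk.2.1 _ hq1).2
        have := (hrk.2.1 q hq).2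
        omega
      exact hrootcase q hq hroot'
    | succ d ih =>
      intro q hq hk
      by_cases hroot' : IsRt p q
      · exact hrootcase q hq hroot'
      · have hqry : q ≠ ry := fun h => hroot' (h ▸ hrooty)
        have hq1 : (ent p q).toNat < n := by have := hp.2 q hq; omega
        have hs1 : chase k p q = chase k p (ent p q).toNat := chase_step n k p rk hp hrk q hq hroot'
        have hnr : ¬ IsRt (p.set ry (rx : Int)) q := by rw [hrtiff q hqry]; exact hroot'
        have hs2 : chase (k+1) (p.set ry (rx : Int)) q = chase (k+1) (p.set ry (rx : Int)) (ent p q).toNat := by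
          have := chase_step n (k+1) _ rk' hpok hrk' q hq hnr
          rwa [hent, if_neg hqry] at this
        have hbound : (k : Int) ≤ d + ent rk (ent p q).toNat := by
          have h1 := hrk.2.2 q hq hroot'
          omega
        rw [hs1, hs2, ih _ hq1 hbound]
  intro q hq
  exact main k q hq (by have := (hrk.2.1 q hq).1; omega)

theorem union_endgame (n k : Nat) (p2 rk : List Int) (hp2 : POK n p2) (hrk2 : RK n k p2 rk)
    (RX RY : Nat) (hRXn : RX < n) (hRYn : RY < n) (hne : RX ≠ RY)
    (hrootX : IsRt p2 RX) (hrootY : IsRt p2 RY) (hyx : ent rk RY ≤ ent rk RX) :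
    POK n (p2.set RY (RX : Int)) ∧
    RK n (k+1) (p2.set RY (RX : Int)) (if ent rk RX = ent rk RY then rk.set RX (ent rk RX + 1) else rk) ∧
    (∀ x y : Nat, x < n → y < n →
      (chase (k+1) (p2.set RY (RX : Int)) x = chase (k+1) (p2.set RY (RX : Int)) y ↔
        (chase k p2 x = chase k p2 y ∨
          ((chase k p2 x = RX ∨ chase k p2 x = RY) ∧ (chase k p2 y = RX ∨ chase k p2 y = RY))))) := by
  have hlen2 : p2.length = n := hp2.1
  have hrklen : rk.length = n := hrk2.1
  have hentp' : ∀ q, ent (p2.set RY (RX : Int)) q = if q = RY then (RX : Int) else ent p2 q := by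
    intro q
    rw [ent_set]
    by_cases h : q = RY
    · rw [if_pos ⟨h.symm, by omega⟩, if_pos h]
    · rw [if_neg (by tauto), if_neg h]
  have hpok' : POK n (p2.set RY (RX : Int)) := by
    refine ⟨by simp [hlen2], fun q hq => ?_⟩
    rw [hentp']
    split
    · constructor <;> [positivity; exact_mod_cast hRXn]
    · exact hp2.2 q hq
  have hrtiff : ∀ q, q ≠ RY → (IsRt (p2.set RY (RX : Int)) q ↔ IsRt p2 q) := by
    intro q hq; unfold IsRt; rw [hentp', if_neg hq]
  have hentrk' : ∀ q : Nat,
      ent (if ent rk RX = ent rk RY then rk.set RX (ent rk RX + 1) else rk) q =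
        if ent rk RX = ent rk RY ∧ q = RX then ent rk RX + 1 else ent rk q := by
    intro q
    by_cases hupd : ent rk RX = ent rk RY
    · rw [if_pos hupd, ent_set]
      by_cases h : q = RX
      · rw [if_pos ⟨h.symm, by omega⟩, if_pos ⟨hupd, h⟩]
      · rw [if_neg (by tauto), if_neg (by tauto)]
    · rw [if_neg hupd, if_neg (by tauto)]
  have hrknew : RK n (k+1) (p2.set RY (RX : Int)) (if ent rk RX = ent rk RY then rk.set RX (ent rk RX + 1) else rk) := by
    refine ⟨by split <;> simp [hrklen], fun q hq => ?_, fun q hq hnr => ?_⟩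
    · rw [hentrk' q]
      have h1 := hrk2.2.1 q hq
      have h2 := hrk2.2.1 RX hRXn
      split <;> push_cast <;> omega
    · by_cases hqRY : q = RY
      · rw [hqRY, hentp', if_pos rfl, Int.toNat_natCast, hentrk' RY, hentrk' RX]
        have hne' : ¬ (RY = RX) := fun h => hne h.symm
        by_cases hupd : ent rk RX = ent rk RY
        · rw [if_neg (by tauto), if_pos ⟨hupd, rfl⟩]
          omega
        · rw [if_neg (by tauto), if_neg (by tauto)]
          omega
      · have hnr2 : ¬ IsRt p2 q := by rwa [hrtiff q hqRY] at hnr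
        have hqRX : q ≠ RX := by
          intro h
          exact hnr2 (h ▸ hrootX)
        have h1 := hrk2.2.2 q hq hnr2
        rw [hentp', if_neg hqRY, hentrk' q, if_neg (by tauto), hentrk' ((ent p2 q).toNat)]
        split_ifs with hcase
        · rw [← hcase.2]
          omega
        · omega
  refine ⟨hpok', hrknew, fun x y hx hy => ?_⟩
  have hform := chase_set_root n k p2 rk _ hp2 hrk2 RX RY hRXn hRYn hrootX hrootY hne hrknew
  rw [hform x hx, hform y hy]
  split_ifs with cx cy <;> constructor <;> intro h <;> first
    | omega
    | (rcases h with h | ⟨hx' | hx', hy' | hy'⟩ <;> omega)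

theorem pvUnion_spec (n k : Nat) (p rk : List Int) (hp : POK n p) (hrk : RK n k p rk)
    (F : Nat) (hF : (k : Int) + 1 < (F : Int)) (i j : Int)
    (hi1 : -(n : Int) ≤ i) (hi2 : i < (n : Int)) (hj1 : -(n : Int) ≤ j) (hj2 : j < (n : Int)) :
    POK n (pvUnion F (p, rk) i j).1 ∧ RK n (k+1) (pvUnion F (p, rk) i j).1 (pvUnion F (p, rk) i j).2 ∧
    (∀ x y : Nat, x < n → y < n →
      (chase (k+1) (pvUnion F (p, rk) i j).1 x = chase (k+1) (pvUnion F (p, rk) i j).1 y ↔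
        (chase k p x = chase k p y ∨
          ((chase k p x = chase k p (normN n i) ∨ chase k p x = chase k p (normN n j)) ∧
           (chase k p y = chase k p (normN n i) ∨ chase k p y = chase k p (normN n j)))))) := by
  have hfi : (k : Int) + 1 < (F : Int) + ent rk (normN n i) := by
    have := (hrk.2.1 _ (normN_lt n i hi1 hi2)).1; omega
  obtain ⟨e1, hp1, hrk1, hpres1⟩ := find_spec n k rk F p i hp hrk hi1 hi2 hfi
  have hfj : (k : Int) + 1 < (F : Int) + ent rk (normN n j) := by
    have := (hrk.2.1 _ (normN_lt n j hj1 hj2)).1; omega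
  obtain ⟨e2, hp2, hrk2, hpres2⟩ := find_spec n k rk F (pvFind F p i).1 j hp1 hrk1 hj1 hj2 hfj
  have hP : ∀ q, q < n → chase k (pvFind F (pvFind F p i).1 j).1 q = chase k p q :=
    fun q hq => (hpres2 q hq).trans (hpres1 q hq)
  rw [hpres1 _ (normN_lt n j hj1 hj2)] at e2
  have hmi : normN n i < n := normN_lt n i hi1 hi2
  have hmj : normN n j < n := normN_lt n j hj1 hj2
  have hrin : chase k p (normN n i) < n := (chase_stable n k p rk hp hrk _ hmi).2.2
  have hrjn : chase k p (normN n j) < n := (chase_stable n k p rk hp hrk _ hmj).2.2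
  have hrooti : IsRt (pvFind F (pvFind F p i).1 j).1 (chase k p (normN n i)) := by
    have h1 : chase k p (normN n i) = chase k (pvFind F (pvFind F p i).1 j).1 (normN n i) := (hP _ hmi).symm
    rw [h1]
    exact (chase_stable n k _ rk hp2 hrk2 _ hmi).2.1
  have hrootj : IsRt (pvFind F (pvFind F p i).1 j).1 (chase k p (normN n j)) := by
    have h1 : chase k p (normN n j) = chase k (pvFind F (pvFind F p i).1 j).1 (normN n j) := (hP _ hmj).symm
    rw [h1]
    exact (chase_stable n k _ rk hp2 hrk2 _ hmj).2.1
  by_cases hif : (pvFind F p i).2 = (pvFind F (pvFind F p i).1 j).2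
  · -- same root: state unchanged
    have hval : pvUnion F (p, rk) i j = ((pvFind F (pvFind F p i).1 j).1, rk) := by
      simp only [pvUnion]
      rw [if_pos hif]
    have hrij : chase k p (normN n i) = chase k p (normN n j) := by
      rw [e1, e2] at hif
      exact_mod_cast hif
    rw [hval]
    refine ⟨hp2, RK_mono n k _ _ hrk2, fun x y hx hy => ?_⟩
    have hsx : chase (k+1) (pvFind F (pvFind F p i).1 j).1 x = chase k p x := by
      rw [(chase_stable n k _ rk hp2 hrk2 x hx).1 (k+1) (by omega), hP x hx]
    have hsy : chase (k+1) (pvFind F (pvFind F p i).1 j).1 y = chase k p y := by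
      rw [(chase_stable n k _ rk hp2 hrk2 y hy).1 (k+1) (by omega), hP y hy]
    rw [hsx, hsy]
    constructor
    · exact Or.inl
    · rintro (h | ⟨hx' | hx', hy' | hy'⟩) <;> [exact h; skip; skip; skip; skip] <;> rw [hx', hy'] <;> rw [hrij]
  · -- different roots: link and maybe bump a rank
    set RI := chase k p (normN n i) with hRIdef
    set RJ := chase k p (normN n j) with hRJdef
    have hrij : RI ≠ RJ := by
      intro h; apply hif; rw [e1, e2, h]
    have hgi : PySem.List.pyGetD rk (pvFind F p i).2 0 = ent rk RI := by
      rw [e1, pyGetD_ent n rk hrk.1 _ (by omega) (by exact_mod_cast hrin), normN_cast]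
    have hgj : PySem.List.pyGetD rk (pvFind F (pvFind F p i).1 j).2 0 = ent rk RJ := by
      rw [e2, pyGetD_ent n rk hrk.1 _ (by omega) (by exact_mod_cast hrjn), normN_cast]
    have hset : ∀ (RX RY : Nat), RX < n → RY < n →
        PySem.List.pySetD (pvFind F (pvFind F p i).1 j).1 (RY : Int) (RX : Int) =
          (pvFind F (pvFind F p i).1 j).1.set RY (RX : Int) := by
      intro RX RY _ hRY
      rw [pySetD_ent n _ hp2.1 _ _ (by omega) (by exact_mod_cast hRY), normN_cast]
    have hsetrk : ∀ (RX : Nat), RX < n →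
        PySem.List.pySetD rk (RX : Int) (ent rk RX + 1) = rk.set RX (ent rk RX + 1) := by
      intro RX hRX
      rw [pySetD_ent n rk hrk.1 _ _ (by omega) (by exact_mod_cast hRX), normN_cast]
    have hgrk : ∀ (RX : Nat), RX < n → PySem.List.pyGetD rk (RX : Int) 0 = ent rk RX := by
      intro RX hRX
      rw [pyGetD_ent n rk hrk.1 _ (by omega) (by exact_mod_cast hRX), normN_cast]
    by_cases hsw : PySem.List.pyGetD rk (pvFind F p i).2 0 < PySem.List.pyGetD rk (pvFind F (pvFind F p i).1 j).2 0
    · -- swap: RX = RJ, RY = RI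
      have hval : pvUnion F (p, rk) i j =
          ((pvFind F (pvFind F p i).1 j).1.set RI (RJ : Int),
            if ent rk RJ = ent rk RI then rk.set RJ (ent rk RJ + 1) else rk) := by
        have hsw' : ent rk RI < ent rk RJ := by rw [hgi, hgj] at hsw; exact hsw
        simp only [pvUnion]
        rw [if_neg hif, e1, e2, hgrk RI hrin, hgrk RJ hrjn]
        simp only [if_pos hsw']
        rw [hgrk RJ hrjn, hgrk RI hrin, hset RJ RI hrjn hrin, hsetrk RJ hrjn]
      have hyx : ent rk RI ≤ ent rk RJ := by rw [hgi, hgj] at hsw; omega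
      obtain ⟨ha, hb, hc⟩ := union_endgame n k _ rk hp2 hrk2 RJ RI hrjn hrin
        (fun h => hrij h.symm) hrootj hrooti hyx
      rw [hval]
      refine ⟨ha, hb, fun x y hx hy => ?_⟩
      rw [hc x y hx hy, hP x hx, hP y hy]
      tauto
    · -- no swap: RX = RI, RY = RJ
      have hval : pvUnion F (p, rk) i j =
          ((pvFind F (pvFind F p i).1 j).1.set RJ (RI : Int),
            if ent rk RI = ent rk RJ then rk.set RI (ent rk RI + 1) else rk) := by
        have hsw' : ¬ (ent rk RI < ent rk RJ) := by rw [hgi, hgj] at hsw; exact hsw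
        simp only [pvUnion]
        rw [if_neg hif, e1, e2, hgrk RI hrin, hgrk RJ hrjn]
        simp only [if_neg hsw']
        rw [hgrk RI hrin, hgrk RJ hrjn, hset RI RJ hrin hrjn, hsetrk RI hrin]
      have hyx : ent rk RJ ≤ ent rk RI := by rw [hgi, hgj] at hsw; omega
      obtain ⟨ha, hb, hc⟩ := union_endgame n k _ rk hp2 hrk2 RI RJ hrin hrjn hrij hrooti hrootj hyx
      rw [hval]
      refine ⟨ha, hb, fun x y hx hy => ?_⟩
      rw [hc x y hx hy, hP x hx, hP y hy]


theorem relabel_ent (n : Nat) (a : Int) :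
    ∀ (L : List Int) (l : List Int), l.length = n →
      (∀ x ∈ L, ∃ m : Nat, m < n ∧ x = (m : Int)) →
      (L.foldl (fun l k => PySem.List.pySetD l k a) l).length = n ∧
      ∀ q : Nat, q < n →
        ent (L.foldl (fun l k => PySem.List.pySetD l k a) l) q = if (q : Int) ∈ L then a else ent l q := by
  intro L
  induction L with
  | nil => intro l hl _; exact ⟨hl, fun q hq => by simp⟩
  | cons x L ih =>
    intro l hl hmem
    obtain ⟨m0, hm0, rfl⟩ := hmem x List.mem_cons_self
    have hset : PySem.List.pySetD l (m0 : Int) a = l.set m0 a := by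
      rw [pySetD_ent n l hl _ _ (by omega) (by exact_mod_cast hm0), normN_cast]
    have hlen : (l.set m0 a).length = n := by simp [hl]
    obtain ⟨ih1, ih2⟩ := ih (l.set m0 a) hlen (fun x hx => hmem x (List.mem_cons_of_mem _ hx))
    refine ⟨by simpa [hset] using ih1, fun q hq => ?_⟩
    simp only [List.foldl_cons, hset]
    rw [ih2 q hq, ent_set]
    by_cases hqL : (q : Int) ∈ L
    · simp [hqL]
    · by_cases hqm : q = m0
      · subst hqm
        simp [hqL, hl, hq]
      · have : ¬ (m0 = q ∧ m0 < l.length) := by tauto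
        simp [hqL, this, hqm]

theorem dict_get?_erase (d : PySem.Dict Int (List Int)) (b c : Int) :
    (d.erase b).get? c = if c = b then none else d.get? c := by
  rcases d with ⟨items⟩
  unfold PySem.Dict.erase PySem.Dict.get?
  simp only
  induction items with
  | nil => simp
  | cons p rest ih =>
    by_cases hpb : p.1 = b
    · rw [List.filter_cons_of_neg (by simp [hpb])]
      by_cases hcb : c = b
      · simpa [hcb] using ih
      · rw [List.find?_cons_of_neg (by simp [hpb, hcb]; omega), if_neg hcb]
        simpa [hcb] using ih
    · rw [List.filter_cons_of_pos (by simp [hpb])]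
      by_cases hpc : p.1 = c
      · rw [List.find?_cons_of_pos (by simp [hpc]), List.find?_cons_of_pos (by simp [hpc]),
          if_neg (show ¬ (c = b) from fun h => hpb (by rw [hpc, h]))]
      · rw [List.find?_cons_of_neg (by simp [hpc]), List.find?_cons_of_neg (by simp [hpc])]
        exact ih

theorem merge_endgame (n : Nat) (l : List Int) (d : PySem.Dict Int (List Int))
    (hl : LOK n l) (hd : MOK n l d) (a b : Int) (hab : a ≠ b)
    (ha0 : 0 ≤ a) (ha1 : a < (n : Int)) (La Lb : List Int)
    (hA : d.get? a = some La) (hB : d.get? b = some Lb) :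
    LOK n (Lb.foldl (fun l k => PySem.List.pySetD l k a) l) ∧
    MOK n (Lb.foldl (fun l k => PySem.List.pySetD l k a) l)
      (PySem.Dict.erase (PySem.Dict.modify d a [] (fun L => L ++ Lb)) b) ∧
    (∀ q : Nat, q < n → ent (Lb.foldl (fun l k => PySem.List.pySetD l k a) l) q =
      if ent l q = b then a else ent l q) := by
  have hLa := (hd a).2 La hA
  have hLb := (hd b).2 Lb hB
  have hmemb : ∀ x ∈ Lb, ∃ m : Nat, m < n ∧ x = (m : Int) := by
    intro x hx
    obtain ⟨m, hm, _, hxm⟩ := (hLb x).1 hx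
    exact ⟨m, hm, hxm⟩
  obtain ⟨hlen', hent'⟩ := relabel_ent n a Lb l hl.1 hmemb
  have hql : ∀ q : Nat, q < n →
      ent (Lb.foldl (fun l k => PySem.List.pySetD l k a) l) q = if ent l q = b then a else ent l q := by
    intro q hq
    rw [hent' q hq]
    by_cases hmem : (q : Int) ∈ Lb
    · obtain ⟨m, hm, hentm, hqm⟩ := (hLb (q : Int)).1 hmem
      have : m = q := by exact_mod_cast hqm.symm
      rw [if_pos hmem, if_pos (this ▸ hentm)]
    · rw [if_neg hmem, if_neg ?_]
      intro hc
      exact hmem ((hLb (q : Int)).2 ⟨q, hq, hc, rfl⟩)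
  have hlok : LOK n (Lb.foldl (fun l k => PySem.List.pySetD l k a) l) := by
    refine ⟨hlen', fun q hq => ?_⟩
    rw [hql q hq]
    split
    · exact ⟨ha0, ha1⟩
    · exact hl.2 q hq
  have hget' : ∀ c : Int,
      (PySem.Dict.erase (PySem.Dict.modify d a [] (fun L => L ++ Lb)) b).get? c =
        if c = b then none else if c = a then some (PySem.Dict.getD d a [] ++ Lb) else d.get? c := by
    intro c
    rw [dict_get?_erase]
    by_cases hcb : c = b
    · rw [if_pos hcb, if_pos hcb]
    · rw [if_neg hcb, if_neg hcb]
      unfold PySem.Dict.modify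
      rw [PySem.Dict.get?_insert]
  have hgetDa : PySem.Dict.getD d a [] = La := by
    rw [PySem.Dict.getD_eq_get?_getD, hA]; rfl
  refine ⟨hlok, fun c => ⟨?_, ?_⟩, hql⟩
  · -- get? c = none case
    intro hc m hm
    rw [hget'] at hc
    rw [hql m hm]
    by_cases hcb : c = b
    · subst hcb
      split
      · exact hab
      · assumption
    · rw [if_neg hcb] at hc
      by_cases hca : c = a
      · rw [if_pos hca] at hc
        exact absurd hc (by simp)
      · rw [if_neg hca] at hc
        have := (hd c).1 hc m hm
        split
        · exact fun h => hca (h.symm ▸ rfl)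
        · exact this
  · -- get? c = some L case
    intro L hc x
    rw [hget'] at hc
    by_cases hcb : c = b
    · rw [if_pos hcb] at hc
      exact absurd hc (by simp)
    · rw [if_neg hcb] at hc
      by_cases hca : c = a
      · rw [if_pos hca, hgetDa] at hc
        obtain rfl : La ++ Lb = L := by injection hc
        subst hca
        constructor
        · intro hx
          rcases List.mem_append.1 hx with hx | hx
          · obtain ⟨m, hm, hentm, hxm⟩ := (hLa x).1 hx
            refine ⟨m, hm, ?_, hxm⟩
            rw [hql m hm, hentm, if_neg hab]
          · obtain ⟨m, hm, hentm, hxm⟩ := (hLb x).1 hx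
            refine ⟨m, hm, ?_, hxm⟩
            rw [hql m hm, if_pos hentm]
        · rintro ⟨m, hm, hentm, hxm⟩
          rw [hql m hm] at hentm
          by_cases hb' : ent l m = b
          · exact List.mem_append.2 (Or.inr ((hLb x).2 ⟨m, hm, hb', hxm⟩))
          · rw [if_neg hb'] at hentm
            exact List.mem_append.2 (Or.inl ((hLa x).2 ⟨m, hm, hentm, hxm⟩))
      · rw [if_neg hca] at hc
        have hchar := (hd c).2 L hc x
        constructor
        · intro hx
          obtain ⟨m, hm, hentm, hxm⟩ := hchar.1 hx
          refine ⟨m, hm, ?_, hxm⟩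
          rw [hql m hm, if_neg (fun h => hcb (hentm.symm.trans h))]
          exact hentm
        · rintro ⟨m, hm, hentm, hxm⟩
          rw [hql m hm] at hentm
          apply hchar.2
          refine ⟨m, hm, ?_, hxm⟩
          by_cases hb' : ent l m = b
          · rw [if_pos hb'] at hentm
            exact absurd hentm.symm hca
          · rwa [if_neg hb'] at hentm

theorem pvMerge_spec (n : Nat) (l : List Int) (d : PySem.Dict Int (List Int))
    (hl : LOK n l) (hd : MOK n l d) (i j : Int)
    (hi1 : -(n : Int) ≤ i) (hi2 : i < (n : Int)) (hj1 : -(n : Int) ≤ j) (hj2 : j < (n : Int)) :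
    LOK n (pvMerge (l, d) i j).1 ∧ MOK n (pvMerge (l, d) i j).1 (pvMerge (l, d) i j).2 ∧
    (∀ x y : Nat, x < n → y < n →
      (ent (pvMerge (l, d) i j).1 x = ent (pvMerge (l, d) i j).1 y ↔
        (ent l x = ent l y ∨
          ((ent l x = ent l (normN n i) ∨ ent l x = ent l (normN n j)) ∧
           (ent l y = ent l (normN n i) ∨ ent l y = ent l (normN n j)))))) := by
  have hmi := normN_lt n i hi1 hi2
  have hmj := normN_lt n j hj1 hj2
  have hga : PySem.List.pyGetD l i 0 = ent l (normN n i) := pyGetD_ent n l hl.1 i hi1 hi2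
  have hgb : PySem.List.pyGetD l j 0 = ent l (normN n j) := pyGetD_ent n l hl.1 j hj1 hj2
  by_cases heq : ent l (normN n i) = ent l (normN n j)
  · have hval : pvMerge (l, d) i j = (l, d) := by
      simp only [pvMerge]
      rw [hga, hgb, if_pos heq]
    rw [hval]
    dsimp only
    refine ⟨hl, hd, fun x y hx hy => ⟨Or.inl, ?_⟩⟩
    rintro (h | ⟨hx' | hx', hy' | hy'⟩) <;> omega
  · obtain ⟨La, hA⟩ : ∃ La, d.get? (ent l (normN n i)) = some La := by
      cases hAc : d.get? (ent l (normN n i)) with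
      | none => exact absurd rfl ((hd _).1 hAc (normN n i) hmi)
      | some La => exact ⟨La, rfl⟩
    obtain ⟨Lb, hB⟩ : ∃ Lb, d.get? (ent l (normN n j)) = some Lb := by
      cases hBc : d.get? (ent l (normN n j)) with
      | none => exact absurd rfl ((hd _).1 hBc (normN n j) hmj)
      | some Lb => exact ⟨Lb, rfl⟩
    have hgetDa : PySem.Dict.getD d (ent l (normN n i)) [] = La := by
      rw [PySem.Dict.getD_eq_get?_getD, hA]; rfl
    have hgetDb : PySem.Dict.getD d (ent l (normN n j)) [] = Lb := by
      rw [PySem.Dict.getD_eq_get?_getD, hB]; rfl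
    have hend : ∀ (a b : Int), a ≠ b → 0 ≤ a → a < (n : Int) → ∀ La' Lb',
        d.get? a = some La' → d.get? b = some Lb' →
        (∀ q : Nat, q < n → ent (Lb'.foldl (fun l k => PySem.List.pySetD l k a) l) q =
          if ent l q = b then a else ent l q) ∧
        LOK n (Lb'.foldl (fun l k => PySem.List.pySetD l k a) l) ∧
        MOK n (Lb'.foldl (fun l k => PySem.List.pySetD l k a) l)
          (PySem.Dict.erase (PySem.Dict.modify d a [] (fun L => L ++ Lb')) b) :=
      fun a b hab h0 h1 La' Lb' hA' hB' =>
        ⟨(merge_endgame n l d hl hd a b hab h0 h1 La' Lb' hA' hB').2.2,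
         (merge_endgame n l d hl hd a b hab h0 h1 La' Lb' hA' hB').1,
         (merge_endgame n l d hl hd a b hab h0 h1 La' Lb' hA' hB').2.1⟩
    by_cases hsw : (PySem.Dict.getD d (ent l (normN n i)) []).length < (PySem.Dict.getD d (ent l (normN n j)) []).length
    · -- swap: a := label[j]'s class survives
      have hval : pvMerge (l, d) i j =
          (La.foldl (fun acc k => PySem.List.pySetD acc k (ent l (normN n j))) l,
           PySem.Dict.erase (PySem.Dict.modify d (ent l (normN n j)) [] (fun L => L ++ La)) (ent l (normN n i))) := by
        simp only [pvMerge]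
        rw [hga, hgb, if_neg heq]
        simp only [if_pos hsw]
        rw [hgetDa]
      obtain ⟨hq, hlok, hmok⟩ := hend _ _ (fun h => heq h.symm) (hl.2 _ hmj).1 (hl.2 _ hmj).2 Lb La hB hA
      rw [hval]
      dsimp only
      refine ⟨hlok, hmok, fun x y hx hy => ?_⟩
      rw [hq x hx, hq y hy]
      split_ifs <;> constructor <;> intro h <;> omega
    · have hval : pvMerge (l, d) i j =
          (Lb.foldl (fun acc k => PySem.List.pySetD acc k (ent l (normN n i))) l,
           PySem.Dict.erase (PySem.Dict.modify d (ent l (normN n i)) [] (fun L => L ++ Lb)) (ent l (normN n j))) := by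
        simp only [pvMerge]
        rw [hga, hgb, if_neg heq]
        simp only [if_neg hsw]
        rw [hgetDb]
      obtain ⟨hq, hlok, hmok⟩ := hend _ _ heq (hl.2 _ hmi).1 (hl.2 _ hmi).2 La Lb hA hB
      rw [hval]
      dsimp only
      refine ⟨hlok, hmok, fun x y hx hy => ?_⟩
      rw [hq x hx, hq y hy]
      split_ifs <;> constructor <;> intro h <;> omega

set_option maxHeartbeats 1000000 in
theorem fold_edges (n F : Nat) :
    ∀ (es : List (Int × Int)) (k : Nat) (p rk l : List Int) (d : PySem.Dict Int (List Int)),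
      (∀ e ∈ es, -(n : Int) ≤ e.1 ∧ e.1 < (n : Int) ∧ -(n : Int) ≤ e.2 ∧ e.2 < (n : Int)) →
      POK n p → RK n k p rk → LOK n l → MOK n l d →
      (∀ x y : Nat, x < n → y < n → (chase k p x = chase k p y ↔ ent l x = ent l y)) →
      ((k : Int) + es.length < (F : Int)) →
      POK n (es.foldl (fun s e => pvUnion F s e.1 e.2) (p, rk)).1 ∧
      RK n (k + es.length) (es.foldl (fun s e => pvUnion F s e.1 e.2) (p, rk)).1
        (es.foldl (fun s e => pvUnion F s e.1 e.2) (p, rk)).2 ∧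
      LOK n (es.foldl (fun s e => pvMerge s e.1 e.2) (l, d)).1 ∧
      MOK n (es.foldl (fun s e => pvMerge s e.1 e.2) (l, d)).1
        (es.foldl (fun s e => pvMerge s e.1 e.2) (l, d)).2 ∧
      (∀ x y : Nat, x < n → y < n →
        (chase (k + es.length) (es.foldl (fun s e => pvUnion F s e.1 e.2) (p, rk)).1 x =
           chase (k + es.length) (es.foldl (fun s e => pvUnion F s e.1 e.2) (p, rk)).1 y ↔
         ent (es.foldl (fun s e => pvMerge s e.1 e.2) (l, d)).1 x =
           ent (es.foldl (fun s e => pvMerge s e.1 e.2) (l, d)).1 y)) := by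
  intro es
  induction es with
  | nil =>
    intro k p rk l d _ hp hrk hl hd hker _
    simpa using ⟨hp, hrk, hl, hd, hker⟩
  | cons e es ih =>
    intro k p rk l d hb hp hrk hl hd hker hF
    obtain ⟨he1, he2, he3, he4⟩ := hb e List.mem_cons_self
    have hF1 : (k : Int) + 1 < (F : Int) := by
      have : (0 : Int) ≤ es.length := by positivity
      simp only [List.length_cons] at hF
      push_cast at hF
      omega
    obtain ⟨hpU, hrkU, hkerU⟩ := pvUnion_spec n k p rk hp hrk F hF1 e.1 e.2 he1 he2 he3 he4
    obtain ⟨hlM, hdM, hkerM⟩ := pvMerge_spec n l d hl hd e.1 e.2 he1 he2 he3 he4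
    have hker1 : ∀ x y : Nat, x < n → y < n →
        (chase (k+1) (pvUnion F (p, rk) e.1 e.2).1 x = chase (k+1) (pvUnion F (p, rk) e.1 e.2).1 y ↔
          ent (pvMerge (l, d) e.1 e.2).1 x = ent (pvMerge (l, d) e.1 e.2).1 y) := by
      intro x y hx hy
      rw [hkerU x y hx hy, hkerM x y hx hy]
      have h1 := hker x y hx hy
      have h2 := hker x (normN n e.1) hx (normN_lt n e.1 he1 he2)
      have h3 := hker x (normN n e.2) hx (normN_lt n e.2 he3 he4)
      have h4 := hker y (normN n e.1) hy (normN_lt n e.1 he1 he2)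
      have h5 := hker y (normN n e.2) hy (normN_lt n e.2 he3 he4)
      tauto
    have hFs : ((k + 1 : Nat) : Int) + es.length < (F : Int) := by
      simp only [List.length_cons] at hF
      push_cast at hF ⊢
      omega
    have hres := ih (k+1) (pvUnion F (p, rk) e.1 e.2).1 (pvUnion F (p, rk) e.1 e.2).2
      (pvMerge (l, d) e.1 e.2).1 (pvMerge (l, d) e.1 e.2).2
      (fun e' he' => hb e' (List.mem_cons_of_mem _ he')) hpU hrkU hlM hdM hker1 hFs
    simp only [List.foldl_cons, List.length_cons]
    rw [show k + (es.length + 1) = k + 1 + es.length from by omega]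
    exact hres

def PairRel (ms : List Nat) (κ1 κ2 : Nat → Int) (a b : Int × List Int) : Prop :=
  a.2 = b.2 ∧ ∀ x ∈ ms, ((κ1 x = a.1) ↔ (κ2 x = b.1))

theorem snd_eq_of_forall₂ (ms : List Nat) (κ1 κ2 : Nat → Int) :
    ∀ (l1 l2 : List (Int × List Int)), List.Forall₂ (PairRel ms κ1 κ2) l1 l2 →
      l1.map (fun p => p.2) = l2.map (fun p => p.2) := by
  intro l1 l2 h
  induction h with
  | nil => rfl
  | cons hab _ ih => simp [ih, hab.1]

theorem find_corr (ms : List Nat) (κ1 κ2 : Nat → Int) (m : Nat) (hm : m ∈ ms) :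
    ∀ (l1 l2 : List (Int × List Int)), List.Forall₂ (PairRel ms κ1 κ2) l1 l2 →
      (List.find? (fun p => p.1 == κ1 m) l1 = none ∧ List.find? (fun p => p.1 == κ2 m) l2 = none) ∨
      (∃ w, List.find? (fun p => p.1 == κ1 m) l1 = some (κ1 m, w) ∧
            List.find? (fun p => p.1 == κ2 m) l2 = some (κ2 m, w)) := by
  intro l1 l2 h
  induction h with
  | nil => exact Or.inl ⟨by simp, by simp⟩
  | @cons a b l1 l2 hab hrest ih =>
    by_cases ha : a.1 = κ1 m
    · have hb : b.1 = κ2 m := ((hab.2 m hm).1 ha.symm).symm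
      refine Or.inr ⟨a.2, ?_, ?_⟩
      · rw [List.find?_cons_of_pos (by simp [ha])]
        have : a = (κ1 m, a.2) := by rw [← ha]
        rw [this]
      · rw [List.find?_cons_of_pos (by simp [hb])]
        have : b = (κ2 m, b.2) := by rw [← hb]
        rw [this, hab.1]
    · have hb : b.1 ≠ κ2 m := fun hbe => ha (((hab.2 m hm).2 hbe.symm).symm)
      rw [List.find?_cons_of_neg (by simp [ha]), List.find?_cons_of_neg (by simp [hb])]
      exact ih

theorem pv_forall₂_append {R : (Int × List Int) → (Int × List Int) → Prop} :
    ∀ {l1 l2 u1 u2 : List (Int × List Int)}, List.Forall₂ R l1 l2 → List.Forall₂ R u1 u2 →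
      List.Forall₂ R (l1 ++ u1) (l2 ++ u2) := by
  intro l1 l2 u1 u2 h1 h2
  induction h1 with
  | nil => exact h2
  | cons hab _ ih => exact List.Forall₂.cons hab ih

theorem forall₂_map_both {P Q : (Int × List Int) → (Int × List Int) → Prop}
    (f g : (Int × List Int) → (Int × List Int))
    (himp : ∀ a b, P a b → Q (f a) (g b)) :
    ∀ l1 l2, List.Forall₂ P l1 l2 → List.Forall₂ Q (l1.map f) (l2.map g) := by
  intro l1 l2 h
  induction h with
  | nil => exact List.Forall₂.nil
  | cons hab _ ih => exact List.Forall₂.cons (himp _ _ hab) ih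

theorem group_values (v : Nat → Int) :
    ∀ (ms : List Nat) (κ1 κ2 : Nat → Int) (d1 d2 : PySem.Dict Int (List Int)),
      List.Forall₂ (PairRel ms κ1 κ2) d1.items d2.items →
      (∀ x ∈ ms, ∀ y ∈ ms, ((κ1 x = κ1 y) ↔ (κ2 x = κ2 y))) →
      PySem.Dict.values (ms.foldl (fun d m => PySem.Dict.modify d (κ1 m) [] (fun L => L ++ [v m])) d1) =
      PySem.Dict.values (ms.foldl (fun d m => PySem.Dict.modify d (κ2 m) [] (fun L => L ++ [v m])) d2) := by
  intro ms
  induction ms with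
  | nil =>
    intro κ1 κ2 d1 d2 hf _
    exact snd_eq_of_forall₂ [] κ1 κ2 d1.items d2.items hf
  | cons m ms ih =>
    intro κ1 κ2 d1 d2 hf hker
    have hf' : List.Forall₂ (PairRel ms κ1 κ2) d1.items d2.items :=
      List.Forall₂.imp (fun a b hab => ⟨hab.1, fun x hx => hab.2 x (List.mem_cons_of_mem _ hx)⟩) hf
    have hmod1 : PySem.Dict.modify d1 (κ1 m) [] (fun L => L ++ [v m]) =
        d1.insert (κ1 m) (PySem.Dict.getD d1 (κ1 m) [] ++ [v m]) := rfl
    have hmod2 : PySem.Dict.modify d2 (κ2 m) [] (fun L => L ++ [v m]) =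
        d2.insert (κ2 m) (PySem.Dict.getD d2 (κ2 m) [] ++ [v m]) := rfl
    have hget1 : d1.get? (κ1 m) = (List.find? (fun p => p.1 == κ1 m) d1.items).map (fun p => p.2) := rfl
    have hget2 : d2.get? (κ2 m) = (List.find? (fun p => p.1 == κ2 m) d2.items).map (fun p => p.2) := rfl
    rcases find_corr (m :: ms) κ1 κ2 m List.mem_cons_self d1.items d2.items hf with ⟨h1, h2⟩ | ⟨w, h1, h2⟩
    · -- key absent in both
      have hc1 : d1.contains (κ1 m) = false := by
        rw [PySem.Dict.contains_eq_isSome_get?, hget1, h1]; rfl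
      have hc2 : d2.contains (κ2 m) = false := by
        rw [PySem.Dict.contains_eq_isSome_get?, hget2, h2]; rfl
      have hD1 : PySem.Dict.getD d1 (κ1 m) [] = [] := by
        rw [PySem.Dict.getD_eq_get?_getD, hget1, h1]; rfl
      have hD2 : PySem.Dict.getD d2 (κ2 m) [] = [] := by
        rw [PySem.Dict.getD_eq_get?_getD, hget2, h2]; rfl
      have hitems : List.Forall₂ (PairRel ms κ1 κ2)
          (PySem.Dict.modify d1 (κ1 m) [] (fun L => L ++ [v m])).items
          (PySem.Dict.modify d2 (κ2 m) [] (fun L => L ++ [v m])).items := by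
        rw [hmod1, hmod2, PySem.Dict.items_insert_of_not_contains d1 _ hc1,
          PySem.Dict.items_insert_of_not_contains d2 _ hc2, hD1, hD2]
        refine pv_forall₂_append hf' (List.Forall₂.cons ⟨rfl, fun x hx => ?_⟩ List.Forall₂.nil)
        exact hker x (List.mem_cons_of_mem _ hx) m List.mem_cons_self
      simp only [List.foldl_cons]
      exact ih κ1 κ2 _ _ hitems (fun x hx y hy =>
        hker x (List.mem_cons_of_mem _ hx) y (List.mem_cons_of_mem _ hy))
    · -- key present in both, same stored value w
      have hc1 : d1.contains (κ1 m) = true := by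
        rw [PySem.Dict.contains_eq_isSome_get?, hget1, h1]; rfl
      have hc2 : d2.contains (κ2 m) = true := by
        rw [PySem.Dict.contains_eq_isSome_get?, hget2, h2]; rfl
      have hD1 : PySem.Dict.getD d1 (κ1 m) [] = w := by
        rw [PySem.Dict.getD_eq_get?_getD, hget1, h1]; rfl
      have hD2 : PySem.Dict.getD d2 (κ2 m) [] = w := by
        rw [PySem.Dict.getD_eq_get?_getD, hget2, h2]; rfl
      have hitems : List.Forall₂ (PairRel ms κ1 κ2)
          (PySem.Dict.modify d1 (κ1 m) [] (fun L => L ++ [v m])).items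
          (PySem.Dict.modify d2 (κ2 m) [] (fun L => L ++ [v m])).items := by
        rw [hmod1, hmod2, PySem.Dict.items_insert_of_contains d1 _ hc1,
          PySem.Dict.items_insert_of_contains d2 _ hc2, hD1, hD2]
        refine forall₂_map_both _ _ ?_ d1.items d2.items hf
        intro a b hab
        by_cases ha : a.1 = κ1 m
        · have hb : b.1 = κ2 m := ((hab.2 m List.mem_cons_self).1 ha.symm).symm
          rw [if_pos (by simp [ha]), if_pos (by simp [hb])]
          refine ⟨rfl, fun x hx => ?_⟩
          exact hker x (List.mem_cons_of_mem _ hx) m List.mem_cons_self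
        · have hb : b.1 ≠ κ2 m := fun hbe => ha (((hab.2 m List.mem_cons_self).2 hbe.symm).symm)
          rw [if_neg (by simp [ha]), if_neg (by simp [hb])]
          exact ⟨hab.1, fun x hx => hab.2 x (List.mem_cons_of_mem _ hx)⟩
      simp only [List.foldl_cons]
      exact ih κ1 κ2 _ _ hitems (fun x hx y hy =>
        hker x (List.mem_cons_of_mem _ hx) y (List.mem_cons_of_mem _ hy))

theorem groupA (n kk F : Nat) (rkf : List Int) (cs : List (List (String × Int))) :
    ∀ (ms : List Nat) (p : List Int) (d : PySem.Dict Int (List Int)), POK n p → RK n kk p rkf →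
      ((kk : Int) + 1 < (F : Int)) → (∀ m ∈ ms, m < n) →
      (ms.foldl (fun (s : List Int × PySem.Dict Int (List Int)) (m : Nat) =>
          ((pvFind F s.1 (m : Int)).1,
           PySem.Dict.modify s.2 (pvFind F s.1 (m : Int)).2 [] (fun L => L ++ [pvGetId cs (m : Int)]))) (p, d)).2
      = ms.foldl (fun d (m : Nat) => PySem.Dict.modify d ((chase kk p m : Nat) : Int) [] (fun L => L ++ [pvGetId cs (m : Int)])) d := by
  intro ms
  induction ms with
  | nil => intro p d _ _ _ _; rfl
  | cons m ms ih =>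
    intro p d hp hrk hF hms
    have hm : m < n := hms m List.mem_cons_self
    have hfuel : (kk : Int) + 1 < (F : Int) + ent rkf (normN n (m : Int)) := by
      have := (hrk.2.1 (normN n (m : Int)) (by rw [normN_cast]; exact hm)).1
      omega
    obtain ⟨e, hp', hrk', hpres⟩ := find_spec n kk rkf F p (m : Int) hp hrk (by omega)
      (by exact_mod_cast hm) hfuel
    rw [normN_cast] at e
    simp only [List.foldl_cons, e]
    refine (ih (pvFind F p (m : Int)).1
        (PySem.Dict.modify d ((chase kk p m : Nat) : Int) [] (fun L => L ++ [pvGetId cs (m : Int)]))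
        hp' hrk' hF (fun x hx => hms x (List.mem_cons_of_mem _ hx))).trans ?_
    exact PySem.List.foldl_congr_mem ms _ _ _ (fun acc x hx => by rw [hpres x (hms x (List.mem_cons_of_mem _ hx))])

theorem init_members_get? (n : Nat) (c : Int) :
    (((List.range n).foldl (fun d (k : Nat) => PySem.Dict.insert d (k : Int) [(k : Int)]) PySem.Dict.empty).get? c)
      = if 0 ≤ c ∧ c < (n : Int) then some [c] else none := by
  induction n with
  | zero => rw [if_neg (by omega)]; rfl
  | succ n ih =>
    rw [List.range_succ, List.foldl_append, List.foldl_cons, List.foldl_nil, PySem.Dict.get?_insert, ih]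
    by_cases hc : c = (n : Int)
    · rw [if_pos hc, if_pos (by push_cast; omega), hc]
    · rw [if_neg hc]
      by_cases h2 : 0 ≤ c ∧ c < (n : Int)
      · rw [if_pos h2, if_pos (by push_cast; omega)]
      · rw [if_neg h2, if_neg (by push_cast; omega)]

theorem main_equiv (components : List (List (String × Int))) (retained_edges : List (Int × Int))
    (hpre : Pre_step5_union_find_grouping components retained_edges) :
    step5_union_find_grouping components retained_edges = step5_union_find_grouping_alt components retained_edges := by
  by_cases hn0 : components.length = 0
  · have hcomp : components = [] := List.length_eq_zero_iff.1 hn0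
    have hes : retained_edges = [] := by
      cases hE : retained_edges with
      | nil => rfl
      | cons e es =>
        obtain ⟨h1, h2, _, _⟩ := hpre.1 e (hE ▸ List.mem_cons_self)
        rw [hn0] at h1 h2
        omega
    subst hcomp; subst hes; rfl
  · have hnpos : 0 < components.length := Nat.pos_of_ne_zero hn0
    simp only [step5_union_find_grouping, step5_union_find_grouping_alt]
    set n := components.length with hn
    set E := retained_edges.length with hE
    set F := n + E + 1 with hF
    set p0 : List Int := (List.range n).map (fun (k : Nat) => (k : Int)) with hp0def
    set d0 : PySem.Dict Int (List Int) :=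
      (List.range n).foldl (fun d (k : Nat) => PySem.Dict.insert d (k : Int) [(k : Int)]) PySem.Dict.empty with hd0def
    set pfs := retained_edges.foldl (fun s e => pvUnion F s e.1 e.2) (p0, List.replicate n 0) with hpfs
    set lfs := retained_edges.foldl (fun s e => pvMerge s e.1 e.2) (p0, d0) with hlfs
    have hent0 : ∀ m : Nat, m < n → ent p0 m = (m : Int) := by
      intro m hm
      rw [hp0def]
      exact PySem.List.getD_map_range _ n m 0 hm
    have hp0 : POK n p0 := by
      refine ⟨by simp [hp0def], fun m hm => ?_⟩
      rw [hent0 m hm]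
      constructor <;> [positivity; exact_mod_cast hm]
    have hrk0 : RK n 0 p0 (List.replicate n 0) := by
      refine ⟨by simp, fun m hm => ?_, fun m hm hnr => ?_⟩
      · rw [ent, List.getD_replicate _ hm]; simp
      · exact absurd (by unfold IsRt; rw [hent0 m hm]; simp) hnr
    have hd0 : MOK n p0 d0 := by
      intro c
      constructor
      · intro hc m hm
        rw [hd0def, init_members_get? n c] at hc
        rw [hent0 m hm]
        intro hcm
        rw [← hcm] at hc
        rw [if_pos (by constructor <;> [positivity; exact_mod_cast hm])] at hc
        simp at hc
      · intro L hc x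
        rw [hd0def, init_members_get? n c] at hc
        by_cases hok : 0 ≤ c ∧ c < (n : Int)
        · rw [if_pos hok] at hc
          obtain rfl : [c] = L := by injection hc
          constructor
          · intro hx
            have hxc : x = c := by simpa using hx
            refine ⟨c.toNat, by omega, ?_, by omega⟩
            rw [hent0 c.toNat (by omega)]
            omega
          · rintro ⟨m, hm, hentm, rfl⟩
            rw [hent0 m hm] at hentm
            simp [← hentm]
        · rw [if_neg hok] at hc
          simp at hc
    have hker0 : ∀ x y : Nat, x < n → y < n → (chase 0 p0 x = chase 0 p0 y ↔ ent p0 x = ent p0 y) := by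
      intro x y hx hy
      unfold chase
      rw [hent0 x hx, hent0 y hy]
      exact ⟨fun h => by exact_mod_cast h, fun h => by exact_mod_cast h⟩
    have hbounds : ∀ e ∈ retained_edges,
        -(n : Int) ≤ e.1 ∧ e.1 < (n : Int) ∧ -(n : Int) ≤ e.2 ∧ e.2 < (n : Int) :=
      fun e he => hpre.1 e he
    have hF0 : ((0 : Nat) : Int) + retained_edges.length < (F : Int) := by
      rw [hF]; push_cast; omega
    obtain ⟨hpf, hrkf, hlf, hdf, hkerf⟩ := fold_edges n F retained_edges 0 p0 (List.replicate n 0) p0 d0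
      hbounds hp0 hrk0 ⟨hp0.1, hp0.2⟩ hd0 hker0 hF0
    rw [← hpfs] at hpf hrkf hkerf
    rw [← hlfs] at hlf hdf hkerf
    rw [Nat.zero_add] at hrkf hkerf
    have hEF : ((E : Nat) : Int) + 1 < (F : Int) := by rw [hF]; push_cast; omega
    rw [PySem.List.pyRange_zero_nat, List.foldl_map, List.foldl_map]
    refine Eq.trans (congrArg PySem.Dict.values
      (groupA n E F pfs.2 components (List.range n) pfs.1 PySem.Dict.empty hpf hrkf hEF
        (fun m hm => List.mem_range.1 hm))) ?_
    refine Eq.trans (group_values (fun m => pvGetId components (m : Int)) (List.range n)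
      (fun m => ((chase E pfs.1 m : Nat) : Int)) (fun m => ent lfs.1 m)
      PySem.Dict.empty PySem.Dict.empty List.Forall₂.nil ?_) ?_
    · intro x hx y hy
      have h := hkerf x y (List.mem_range.1 hx) (List.mem_range.1 hy)
      constructor
      · intro hcast
        have hcast' : ((chase E pfs.1 x : Nat) : Int) = ((chase E pfs.1 y : Nat) : Int) := hcast
        exact h.1 (Nat.cast_inj.mp hcast')
      · intro hl
        have h2 : chase E pfs.1 x = chase E pfs.1 y := h.2 hl
        show ((chase E pfs.1 x : Nat) : Int) = ((chase E pfs.1 y : Nat) : Int)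
        exact_mod_cast h2
    · refine (congrArg PySem.Dict.values (PySem.List.foldl_congr_mem (List.range n) _ _ PySem.Dict.empty ?_)).symm
      intro acc m hm
      have hmn : m < n := List.mem_range.1 hm
      rw [pyGetD_ent n lfs.1 hlf.1 (m : Int) (by omega) (by exact_mod_cast hmn), normN_cast]


-- ===== VERDICT (by name: the statement is the Claim_ definition above) =====
theorem step5_union_find_grouping_spec : Claim_equal_step5_union_find_grouping := by
  unfold Claim_equal_step5_union_find_grouping Spec_step5_union_find_grouping
  intro components retained_edges _ hpre
  exact main_equiv components retained_edges hpre
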